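-- pv_equiv track=rewrite | github.com/croningp/oligoss | polymersoup/insilico/helpers/helpers.py | generate_reading_frames_sequence
-- ===== SOURCE A (Python) =====
-- def generate_reading_frames_sequence(sequence):
--     """
--     Takes a linear sequence and outputs a list of reading frame shifts for
--     later use in generating proposed fragments for cyclic sequences. A reading
--     frame shift is carried out by taking the final monomer in the sequence
--     and making it the first monomer, shifting the remaining monomers up 1 index
--     in the polymer chain. Example: one reading frame shift of sequence 'AAV'
--     produces shifted sequence 'VAA'
--
--     Args:
--         sequence (str): sequence string consisting of monomer one letter codes
--
--     Returns:
--         reading_frames: list of unique reading frames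
--     """
--     # initiate reading frames list with input sequence
--     reading_frames = [sequence]
--
--     # get list of unique monomers within sequence; if only kind of one monomer
--     # is present, there can only be one reading frame for the sequence.
--     # Therefore, sequence is returned
--     unique_monomers = list(set([c for i, c in enumerate(sequence)]))
--     if len(unique_monomers) == 1:
--         return reading_frames
--
--     # one by one, generate reading frames and check if they are unique (i.e.
--     # not yet in reading_frames list); if so, add to list of reading frames
--     for i in range(0, len(sequence)+1):
--         # take last monomer in sequence (sequence[-1]) and make it the first
--         # monomer
--         sequence = sequence[-1] + sequence[0:len(sequence)-1]
--         if sequence not in reading_frames: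
--             reading_frames.append(sequence)
--
--     # return list of unique reading frames
--     return reading_frames
-- ===== SOURCE B (Python) =====
-- def generate_reading_frames_sequence(sequence):
--     # Cycle detection: the first rotation to repeat is always the original
--     # sequence, so rotate until it reappears; every rotation collected before
--     # that is unique by construction (no membership dedup, no special case).
--     frames = [sequence]
--     s = sequence[-1] + sequence[:-1]
--     while s != sequence:
--         frames.append(s)
--         s = s[-1] + s[:-1]
--     return frames
-- ===== Notes on version B (the rewrite author's own statement) =====
-- stated objective: simpler
-- what changed: B replaces A's fixed len+1 rotation loop with a membership-dedup scan of the frames list by cycle detection: it rotates only until the original sequence reappears, so every collected rotation is unique by construction and the single-monomer special case disappears.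
import Mathlib
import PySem

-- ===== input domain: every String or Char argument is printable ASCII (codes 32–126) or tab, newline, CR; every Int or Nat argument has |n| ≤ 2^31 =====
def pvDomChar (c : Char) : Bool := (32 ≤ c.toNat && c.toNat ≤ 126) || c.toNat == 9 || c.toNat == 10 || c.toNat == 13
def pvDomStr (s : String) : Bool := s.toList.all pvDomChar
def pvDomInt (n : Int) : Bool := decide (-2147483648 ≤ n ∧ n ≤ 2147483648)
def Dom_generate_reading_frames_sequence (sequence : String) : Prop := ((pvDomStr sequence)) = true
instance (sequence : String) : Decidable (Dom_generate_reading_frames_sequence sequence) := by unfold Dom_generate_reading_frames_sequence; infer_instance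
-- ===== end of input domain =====

-- B replaces A's fixed-count rotation loop with membership dedup by cycle detection
-- (rotate until the original sequence reappears); objective: simpler.
-- Both A and B raise IndexError on "" (sequence[-1]); Pre_ excludes exactly that input.

-- ===== PORT A =====
-- sequence[-1] + sequence[0:len(sequence)-1]  (on "" Python raises; the none-branch is a totality guard, unreachable under Pre_)
def pvShiftA (s : String) : String :=
  (match PySem.Str.pyGet? s (-1) with
   | some c => String.ofList [c]
   | none => String.ofList []) ++ PySem.Str.slice s (some 0) (some (PySem.Str.len s - 1))

def generate_reading_frames_sequence (sequence : String) : List String :=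
  let reading_frames := [sequence]
  let unique_monomers := PySem.Set.ofList ((PySem.List.enumerate sequence.toList).map Prod.snd)
  if unique_monomers.length = 1 then reading_frames
  else
    ((PySem.List.pyRange 0 (PySem.Str.len sequence + 1) 1).foldl
      (fun (st : String × List String) _ =>
        let s' := pvShiftA st.1
        (s', if st.2.contains s' then st.2 else st.2 ++ [s']))
      (sequence, reading_frames)).2

-- ===== PORT B =====
-- s[-1] + s[:-1]  (same guard remark as pvShiftA)
def pvShiftB (s : String) : String :=
  (match PySem.Str.pyGet? s (-1) with
   | some c => String.ofList [c]
   | none => String.ofList []) ++ PySem.Str.slice s none (some (-1))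

-- 'while s != sequence' made total by a fuel argument; under Pre_ the cycle
-- closes within sequence.length steps, so the fuel is never exhausted.
def pvBLoop (orig : String) : Nat → String → List String → List String
  | 0, _, acc => acc
  | fuel+1, s, acc => if s = orig then acc else pvBLoop orig fuel (pvShiftB s) (acc ++ [s])

def generate_reading_frames_sequence_alt (sequence : String) : List String :=
  pvBLoop sequence sequence.toList.length (pvShiftB sequence) [sequence]

-- ===== PRECONDITION & SPEC =====
-- Pre_ excludes only the empty string, on which Python A raises IndexError (sequence[-1]).
def Pre_generate_reading_frames_sequence (sequence : String) : Prop := sequence ≠ ""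
instance (sequence : String) : Decidable (Pre_generate_reading_frames_sequence sequence) := by unfold Pre_generate_reading_frames_sequence; infer_instance
def pvWitness_generate_reading_frames_sequence : String := "ABA"

def Spec_generate_reading_frames_sequence (sequence : String) (out : List String) : Prop := out = generate_reading_frames_sequence_alt sequence
instance (sequence : String) (out : List String) : Decidable (Spec_generate_reading_frames_sequence sequence out) := by unfold Spec_generate_reading_frames_sequence; infer_instance

-- ===== CLAIM (what is proved, stated in full; the proofs are below) =====
def Claim_equal_generate_reading_frames_sequence : Prop := ∀ (sequence : String), Dom_generate_reading_frames_sequence sequence → Pre_generate_reading_frames_sequence sequence → Spec_generate_reading_frames_sequence sequence (generate_reading_frames_sequence sequence)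

-- ===== LEMMAS AND PROOFS =====

-- the one-step rotation, at the List Char level
def pvRotc (l : List Char) : List Char :=
  match l.getLast? with
  | none => []
  | some c => c :: l.dropLast

-- the one-step rotation, at the String level
def pvR (s : String) : String := String.ofList (pvRotc s.toList)

lemma pvShiftA_eq (s : String) : pvShiftA s = pvR s := by
  apply String.toList_inj.mp
  rcases List.eq_nil_or_concat s.toList with h | ⟨l', a, h⟩
  · simp [pvShiftA, pvR, pvRotc, PySem.Str.pyGet?_eq, h,
      PySem.List.pyGet?_neg_one, PySem.List.slice_zero_start,
      PySem.List.slice_to_neg_one]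
  · simp only [List.concat_eq_append] at h
    simp [pvShiftA, pvR, pvRotc, PySem.Str.pyGet?_eq, h,
      PySem.List.pyGet?_neg_one, PySem.List.slice_zero_start,
      PySem.List.slice_to_natCast]

lemma pvShiftB_eq (s : String) : pvShiftB s = pvR s := by
  apply String.toList_inj.mp
  rcases List.eq_nil_or_concat s.toList with h | ⟨l', a, h⟩
  · simp [pvShiftB, pvR, pvRotc, PySem.Str.pyGet?_eq, h,
      PySem.List.pyGet?_neg_one, PySem.List.slice_to_neg_one]
  · simp only [List.concat_eq_append] at h
    simp [pvShiftB, pvR, pvRotc, PySem.Str.pyGet?_eq, h,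
      PySem.List.pyGet?_neg_one, PySem.List.slice_to_neg_one]

lemma pvRotc_length (l : List Char) : (pvRotc l).length = l.length := by
  rcases List.eq_nil_or_concat l with rfl | ⟨l', a, rfl⟩ <;> simp [pvRotc]

lemma pvRotc_eq_rotate (l : List Char) : pvRotc l = l.rotate (l.length - 1) := by
  rcases List.eq_nil_or_concat l with rfl | ⟨l', a, rfl⟩
  · simp [pvRotc]
  · simp only [List.concat_eq_append]
    have h : (l' ++ [a]).length - 1 = l'.length := by simp
    rw [h, List.rotate_eq_drop_append_take (by simp)]
    simp [pvRotc]

lemma pvRotc_rotate_one (l : List Char) : (pvRotc l).rotate 1 = l := by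
  rcases Nat.eq_zero_or_pos l.length with h | h
  · simp [List.length_eq_zero_iff.mp h, pvRotc]
  · rw [pvRotc_eq_rotate, List.rotate_rotate, Nat.sub_add_cancel h, List.rotate_length]

lemma pvRotc_inj {a b : List Char} (h : pvRotc a = pvRotc b) : a = b := by
  have := congrArg (fun l => List.rotate l 1) h
  simpa [pvRotc_rotate_one] using this

lemma pvR_inj : Function.Injective pvR := by
  intro a b h
  have h2 : pvRotc a.toList = pvRotc b.toList := by
    have := congrArg String.toList h
    simpa [pvR] using this
  exact String.toList_inj.mp (pvRotc_inj h2)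

lemma pvR_iterate (k : Nat) (s : String) :
    (pvR^[k] s).toList = pvRotc^[k] s.toList := by
  induction k generalizing s with
  | zero => simp
  | succ k ih => simp [Function.iterate_succ_apply, ih, pvR]

lemma pvRotc_iterate_rotate (k : Nat) (l : List Char) :
    pvRotc^[k] l = l.rotate (k * (l.length - 1)) := by
  induction k generalizing l with
  | zero => simp
  | succ k ih =>
    rw [Function.iterate_succ_apply, ih, pvRotc_length, pvRotc_eq_rotate,
      List.rotate_rotate]
    ring_nf

lemma pvR_cycle (s : String) : pvR^[s.toList.length] s = s := by
  apply String.toList_inj.mp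
  rw [pvR_iterate, pvRotc_iterate_rotate, ← List.rotate_mod, Nat.mul_mod_right,
    List.rotate_zero]

-- the list of the first m rotations, oldest first
def pvFrames (s : String) (m : Nat) : List String := (List.range m).map (fun k => pvR^[k] s)

lemma mem_pvFrames {s x : String} {m : Nat} :
    x ∈ pvFrames s m ↔ ∃ k < m, pvR^[k] s = x := by
  simp [pvFrames, eq_comm]

lemma foldl_const_iterate {α β : Type} (g : β → β) (xs : List α) (b : β) :
    xs.foldl (fun st _ => g st) b = g^[xs.length] b := by
  induction xs generalizing b with
  | nil => simp
  | cons x xs ih => simp [List.foldl_cons, ih, Function.iterate_succ_apply]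

lemma pvFrames_succ (s : String) (m : Nat) :
    pvFrames s (m+1) = pvFrames s m ++ [pvR^[m] s] := by
  simp [pvFrames, List.range_succ]

lemma pv_distinct (seq : String) (p : Nat)
    (hp3 : ∀ k, 0 < k → k < p → pvR^[k] seq ≠ seq) :
    ∀ i j, i < j → j < p → pvR^[i] seq ≠ pvR^[j] seq := by
  intro i j hij hjp he
  have h2 : pvR^[i] (pvR^[j-i] seq) = pvR^[i] seq := by
    rw [← Function.iterate_add_apply, Nat.add_sub_cancel' (le_of_lt hij)]
    exact he.symm
  exact hp3 (j-i) (by omega) (by omega) ((pvR_inj.iterate i) h2)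

lemma pv_period (seq : String) (p : Nat) (hp2 : pvR^[p] seq = seq) (k : Nat) :
    pvR^[k+p] seq = pvR^[k] seq := by
  rw [Function.iterate_add_apply, hp2]

lemma pv_mod (seq : String) (p : Nat) (hp1 : 0 < p) (hp2 : pvR^[p] seq = seq) :
    ∀ k, pvR^[k] seq = pvR^[k % p] seq := by
  intro k
  induction k using Nat.strong_induction_on with
  | _ k ih =>
    by_cases h : k < p
    · rw [Nat.mod_eq_of_lt h]
    · rw [not_lt] at h
      calc pvR^[k] seq = pvR^[(k-p)+p] seq := by rw [Nat.sub_add_cancel h]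
        _ = pvR^[k-p] seq := pv_period seq p hp2 _
        _ = pvR^[(k-p) % p] seq := ih (k-p) (by omega)
        _ = pvR^[k % p] seq := by rw [← Nat.mod_eq_sub_mod h]

-- the loop body of port A, with the rotation abstracted to pvR
def pvGA : String × List String → String × List String := fun st =>
  let s' := pvR st.1
  (s', if st.2.contains s' then st.2 else st.2 ++ [s'])

lemma pvGA_eq : (fun (st : String × List String) (_ : Int) =>
    let s' := pvShiftA st.1
    (s', if st.2.contains s' then st.2 else st.2 ++ [s'])) = fun st _ => pvGA st := by
  funext st i
  simp [pvGA, pvShiftA_eq]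

lemma pvA_inv (seq : String) (p : Nat) (hp1 : 0 < p) (hp2 : pvR^[p] seq = seq)
    (hp3 : ∀ k, 0 < k → k < p → pvR^[k] seq ≠ seq) :
    ∀ k, pvGA^[k] (seq, [seq]) = (pvR^[k] seq, pvFrames seq (min (k+1) p)) := by
  intro k
  induction k with
  | zero =>
    have h1 : min 1 p = 1 := by omega
    simp [h1, pvFrames, List.range_one]
  | succ k ih =>
    rw [Function.iterate_succ_apply', ih]
    have hs' : pvR (pvR^[k] seq) = pvR^[k+1] seq :=
      (Function.iterate_succ_apply' pvR k seq).symm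
    by_cases hk : k + 1 < p
    · have hmin : min (k+1) p = k+1 := by omega
      have hnot : pvR^[k+1] seq ∉ pvFrames seq (k+1) := by
        rw [mem_pvFrames]
        rintro ⟨j, hj, hje⟩
        exact pv_distinct seq p hp3 j (k+1) hj hk hje
      have hc : ((pvFrames seq (k+1)).contains (pvR^[k+1] seq)) = false := by
        simpa [List.contains_iff_mem] using hnot
      have hmin2 : min (k+1+1) p = k+2 := by omega
      simp only [pvGA, hs', hmin, hmin2, hc, Bool.false_eq_true, if_false]
      rw [← pvFrames_succ]
    · have hmin : min (k+1) p = p := by omega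
      have hmem : pvR^[k+1] seq ∈ pvFrames seq p := by
        rw [mem_pvFrames]
        exact ⟨(k+1) % p, Nat.mod_lt _ hp1, (pv_mod seq p hp1 hp2 (k+1)).symm⟩
      have hc : ((pvFrames seq p).contains (pvR^[k+1] seq)) = true := by
        simpa [List.contains_iff_mem] using hmem
      have hmin2 : min (k+1+1) p = p := by omega
      simp only [pvGA, hs', hmin, hmin2, hc, if_true]

lemma pvB_spec (seq : String) (p : Nat) (hp2 : pvR^[p] seq = seq)
    (hp3 : ∀ k, 0 < k → k < p → pvR^[k] seq ≠ seq) :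
    ∀ m fuel k, 0 < k → k + m = p → m < fuel →
      pvBLoop seq fuel (pvR^[k] seq) (pvFrames seq k) = pvFrames seq p := by
  intro m
  induction m with
  | zero =>
    intro fuel k hk hkp hf
    obtain ⟨f, rfl⟩ : ∃ f, fuel = f+1 := ⟨fuel-1, by omega⟩
    have hkp' : k = p := by omega
    subst hkp'
    simp [pvBLoop, hp2]
  | succ m ih =>
    intro fuel k hk hkp hf
    obtain ⟨f, rfl⟩ : ∃ f, fuel = f+1 := ⟨fuel-1, by omega⟩
    have hne : pvR^[k] seq ≠ seq := hp3 k hk (by omega)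
    have hs : pvR (pvR^[k] seq) = pvR^[k+1] seq :=
      (Function.iterate_succ_apply' pvR k seq).symm
    simp only [pvBLoop]
    rw [if_neg hne, pvShiftB_eq, hs, ← pvFrames_succ]
    exact ih f (k+1) (by omega) (by omega) (by omega)

-- ===== VERDICT (by name: the statement is the Claim_ definition above) =====
theorem generate_reading_frames_sequence_spec : Claim_equal_generate_reading_frames_sequence := by
  intro seq _ hpre
  unfold Spec_generate_reading_frames_sequence
  have hnil : seq.toList ≠ [] := fun h => hpre (String.toList_eq_nil_iff.mp h)
  have hn : 0 < seq.toList.length := List.length_pos_iff.mpr hnil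
  simp only [generate_reading_frames_sequence, generate_reading_frames_sequence_alt]
  by_cases hu : (PySem.Set.ofList ((PySem.List.enumerate seq.toList).map Prod.snd)).length = 1
  · -- only one kind of monomer: one rotation returns to seq immediately
    obtain ⟨c, hc⟩ := List.length_eq_one_iff.mp hu
    have hall : ∀ x ∈ seq.toList, x = c := by
      intro x hx
      have hx2 : x ∈ PySem.Set.ofList ((PySem.List.enumerate seq.toList).map Prod.snd) :=
        (PySem.Set.mem_ofList _ _).mpr (by simpa using hx)
      rw [hc] at hx2
      simpa using hx2
    obtain ⟨d, hd⟩ : ∃ d, seq.toList.length = d + 1 := ⟨seq.toList.length - 1, by omega⟩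
    have hrep : seq.toList = List.replicate (d+1) c := by
      rw [← hd]
      exact List.eq_replicate_of_mem hall
    have hrotc : pvRotc (List.replicate (d+1) c) = List.replicate (d+1) c := by
      rw [List.replicate_succ']
      simp [pvRotc]
      rw [← List.replicate_succ, List.replicate_succ']
    have hrot : pvR seq = seq := by
      unfold pvR
      rw [hrep, hrotc, ← hrep]
      simp
    rw [if_pos hu, hd]
    simp [pvBLoop, pvShiftB_eq, hrot]
  · -- general case: both sides equal the list of the first p rotations,
    -- p = the least positive k with pvR^[k] seq = seq
    have hex : ∃ k, 0 < k ∧ pvR^[k] seq = seq := ⟨_, hn, pvR_cycle seq⟩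
    set p := Nat.find hex with hpdef
    have hp1 : 0 < p := (Nat.find_spec hex).1
    have hp2 : pvR^[p] seq = seq := (Nat.find_spec hex).2
    have hp3 : ∀ k, 0 < k → k < p → pvR^[k] seq ≠ seq := by
      intro k h1 h2 h3
      exact Nat.find_min hex h2 ⟨h1, h3⟩
    have hpn : p ≤ seq.toList.length := Nat.find_le ⟨hn, pvR_cycle seq⟩
    have hlen : (PySem.List.pyRange 0 (PySem.Str.len seq + 1) 1).length
        = seq.toList.length + 1 := by
      rw [PySem.Str.len_eq,
        show ((seq.toList.length : Int) + 1) = ((seq.toList.length + 1 : Nat) : Int) by push_cast; ring,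
        PySem.List.pyRange_zero_natCast]
      simp
    rw [if_neg hu, pvGA_eq, foldl_const_iterate pvGA, hlen,
      pvA_inv seq p hp1 hp2 hp3 (seq.toList.length + 1)]
    have hmin : min (seq.toList.length + 1 + 1) p = p := by omega
    rw [hmin]
    have hone : pvShiftB seq = pvR^[1] seq := by
      rw [pvShiftB_eq, Function.iterate_one]
    have hfr1 : ([seq] : List String) = pvFrames seq 1 := by
      simp [pvFrames, List.range_one]
    rw [hone, hfr1]
    exact (pvB_spec seq p hp2 hp3 (p-1) seq.toList.length 1 (by omega) (by omega) (by omega)).symm
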